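-- pv_equiv track=rewrite | github.com/lockephi/Allentown-L104-Node | hyper_parameter_kernel.py | calc_hierarchical_params
-- ===== SOURCE A (Python) =====
-- def calc_hierarchical_params(vocab_size: int, levels: int = 4,
--                              base_dim: int = 512) -> int:
--     """Hierarchical multi-scale embeddings."""
--     params = 0
--     for level in range(levels):
--         dim = base_dim * (2 ** level)
--         params += vocab_size * dim
--         if level > 0:
--             prev_dim = base_dim * (2 ** (level - 1))
--             params += dim * dim + prev_dim * dim * 2
--     return params
-- ===== SOURCE B (Python) =====
-- def calc_hierarchical_params(vocab_size: int, levels: int = 4,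
--                              base_dim: int = 512) -> int:
--     """Hierarchical multi-scale embeddings (closed-form geometric sums)."""
--     if levels <= 0:
--         return 0
--     embed = vocab_size * base_dim * (2 ** levels - 1)
--     # per level l >= 1 the transition terms add 2 * base_dim^2 * 4^l
--     trans = 2 * base_dim * base_dim * (4 ** levels - 4) // 3
--     return embed + trans
-- ===== Notes on version B (the rewrite author's own statement) =====
-- stated objective: faster
-- what changed: Replaced the per-level loop with closed-form geometric-series sums for the embedding and transition parameter counts.
import Mathlib
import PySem

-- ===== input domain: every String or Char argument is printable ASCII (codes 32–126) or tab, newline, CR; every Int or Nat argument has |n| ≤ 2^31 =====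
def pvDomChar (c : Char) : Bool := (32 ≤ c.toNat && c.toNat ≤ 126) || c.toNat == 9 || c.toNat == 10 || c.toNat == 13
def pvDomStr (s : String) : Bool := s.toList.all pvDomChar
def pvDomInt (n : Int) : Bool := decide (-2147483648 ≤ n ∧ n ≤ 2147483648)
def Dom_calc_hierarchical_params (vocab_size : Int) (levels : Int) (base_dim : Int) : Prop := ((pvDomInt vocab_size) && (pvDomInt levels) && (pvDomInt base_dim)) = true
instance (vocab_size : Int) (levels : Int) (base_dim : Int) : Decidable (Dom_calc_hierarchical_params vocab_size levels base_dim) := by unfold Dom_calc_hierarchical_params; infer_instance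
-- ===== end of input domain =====

-- B replaces A's per-level loop by closed-form geometric-series sums (O(1) instead of O(levels)).

-- ===== PORT A =====
-- literal transliteration of A's loop: params accumulated over range(levels)
def calc_hierarchical_params (vocab_size : Int) (levels : Int) (base_dim : Int) : Int :=
  (PySem.List.pyRange 0 levels 1).foldl (fun params level =>
    let dim := base_dim * 2 ^ level.toNat       -- 2 ** level (level ≥ 0 inside range(levels))
    let params := params + vocab_size * dim
    if level > 0 then
      let prev_dim := base_dim * 2 ^ (level - 1).toNat
      params + (dim * dim + prev_dim * dim * 2)
    else params) 0

-- ===== PORT B =====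
def calc_hierarchical_params_alt (vocab_size : Int) (levels : Int) (base_dim : Int) : Int :=
  if levels ≤ 0 then 0
  else
    let embed := vocab_size * base_dim * (2 ^ levels.toNat - 1)
    let trans := PySem.Int.floordiv (2 * base_dim * base_dim * (4 ^ levels.toNat - 4)) 3
    embed + trans

-- ===== PRECONDITION & SPEC =====
def Spec_calc_hierarchical_params (vocab_size : Int) (levels : Int) (base_dim : Int) (out : Int) : Prop := out = calc_hierarchical_params_alt vocab_size levels base_dim
instance (vocab_size : Int) (levels : Int) (base_dim : Int) (out : Int) : Decidable (Spec_calc_hierarchical_params vocab_size levels base_dim out) := by unfold Spec_calc_hierarchical_params; infer_instance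

-- ===== CLAIM (what is proved, stated in full; the proofs are below) =====
def Claim_equal_calc_hierarchical_params : Prop := ∀ (vocab_size : Int) (levels : Int) (base_dim : Int), Dom_calc_hierarchical_params vocab_size levels base_dim → Spec_calc_hierarchical_params vocab_size levels base_dim (calc_hierarchical_params vocab_size levels base_dim)

-- ===== LEMMAS AND PROOFS =====

-- the transition-term accumulator of A's loop: level l ≥ 1 contributes 2·b²·4^l
def pvTrans (b : Int) : Nat → Int
  | 0 => 0
  | n + 1 => pvTrans b n + (if n = 0 then 0 else 2 * b * b * 4 ^ n)

lemma pvLoop (v b : Int) (n : Nat) :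
    calc_hierarchical_params v (n : Int) b = v * b * (2 ^ n - 1) + pvTrans b n := by
  induction n with
  | zero => simp [calc_hierarchical_params, pvTrans, PySem.List.pyRange_one_eq_nil]
  | succ m ih =>
    unfold calc_hierarchical_params at ih ⊢
    have hc : ((m + 1 : Nat) : Int) = (m : Int) + 1 := by push_cast; ring
    rw [hc, PySem.List.pyRange_one_succ_right (by exact_mod_cast Nat.zero_le m)]
    rw [List.foldl_append, ih]
    simp only [List.foldl]
    rcases Nat.eq_zero_or_pos m with hm | hm
    · subst hm; simp [pvTrans]
    · have hpos : (0 : Int) < (m : Int) := by exact_mod_cast hm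
      rw [if_pos hpos]
      have h1 : ((m : Int)).toNat = m := Int.toNat_natCast m
      have h2 : ((m : Int) - 1).toNat = m - 1 := by omega
      rw [h1, h2]
      obtain ⟨k, rfl⟩ := Nat.exists_eq_add_of_le hm  -- m = 1 + k
      have e4 : (4 : Int) ^ (1 + k) = 2 ^ (1 + k) * 2 ^ (1 + k) := by
        rw [← mul_pow]; norm_num
      simp only [pvTrans, Nat.add_eq_zero_iff, Nat.add_sub_cancel_left]
      rw [e4]
      ring_nf
      rw [if_neg (by simp)]
      ring

lemma pvTrans_mul_three (b : Int) (n : Nat) (hn : 1 ≤ n) :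
    3 * pvTrans b n = 2 * b * b * (4 ^ n - 4) := by
  induction n with
  | zero => omega
  | succ m ih =>
    rcases Nat.eq_zero_or_pos m with hm | hm
    · subst hm; simp [pvTrans]
    · have := ih hm
      simp only [pvTrans, if_neg (Nat.pos_iff_ne_zero.mp hm)]
      rw [mul_add, this, pow_succ]
      ring

lemma pvTrans_closed (b : Int) (n : Nat) (hn : 1 ≤ n) :
    PySem.Int.floordiv (2 * b * b * (4 ^ n - 4)) 3 = pvTrans b n := by
  rw [← pvTrans_mul_three b n hn, PySem.Int.floordiv_eq_ediv_of_pos (by norm_num)]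
  exact Int.mul_ediv_cancel_left _ (by norm_num)

-- ===== VERDICT (by name: the statement is the Claim_ definition above) =====
theorem calc_hierarchical_params_spec : Claim_equal_calc_hierarchical_params := by
  intro v levels b _
  unfold Spec_calc_hierarchical_params calc_hierarchical_params_alt
  by_cases h : levels ≤ 0
  · rw [if_pos h]
    unfold calc_hierarchical_params
    rw [PySem.List.pyRange_one_eq_nil h]
    rfl
  · rw [if_neg h]
    rw [not_le] at h
    have hn : levels = ((levels.toNat : Int)) := by omega
    have h1 : 1 ≤ levels.toNat := by omega
    rw [hn, pvLoop v b levels.toNat]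
    simp only [Int.toNat_natCast]
    rw [pvTrans_closed b levels.toNat h1]
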